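-- pv_equiv track=rewrite | github.com/Nikkuniku/AtcoderProgramming | yukicoder/2614.py | solve
-- ===== SOURCE A (Python) =====
-- from collections import deque
--
-- def solve(N):
--     q = deque(list("ABC"))
--     for _ in range(N - 1):
--         C = q.pop()
--         q.append("A")
--         q.append(C)
--         q.append("B")
--         q.append("C")
--     return "".join(q)
-- ===== SOURCE B (Python) =====
-- def solve(N):
--     return "AB" + "ACB" * (N - 1) + "C"
-- ===== Notes on version B (the rewrite author's own statement) =====
-- stated objective: simpler
-- what changed: The deque loop always pops a trailing 'C' and re-appends 'A',C,'B','C', so B replaces the whole loop by the closed form "AB" + "ACB"*(N-1) + "C".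
import Mathlib
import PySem

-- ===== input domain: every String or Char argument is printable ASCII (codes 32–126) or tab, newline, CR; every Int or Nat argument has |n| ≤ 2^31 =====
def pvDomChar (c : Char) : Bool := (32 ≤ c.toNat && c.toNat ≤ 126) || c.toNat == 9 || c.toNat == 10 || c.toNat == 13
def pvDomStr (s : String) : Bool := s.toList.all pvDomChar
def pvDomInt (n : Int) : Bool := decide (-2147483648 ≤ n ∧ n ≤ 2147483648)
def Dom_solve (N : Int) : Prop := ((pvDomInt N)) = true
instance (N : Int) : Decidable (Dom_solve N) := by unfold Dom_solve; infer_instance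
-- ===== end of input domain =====

-- B replaces A's deque loop (which always pops the trailing "C" and appends "A", C, "B", "C")
-- by the closed form "AB" + "ACB"*(N-1) + "C"; objective: simpler.

-- ===== PORT A =====
-- one iteration of A's loop body: C = q.pop(); q.append("A"); q.append(C); q.append("B"); q.append("C")
def pvStepA (q : List String) : List String :=
  match PySem.List.pop? q with
  | some (C, q') => q' ++ ["A"] ++ [C] ++ ["B"] ++ ["C"]
  | none => q   -- Python pop() on empty deque raises; never reached (q is never empty)

def solve (N : Int) : String :=
  PySem.Str.join ""
    ((PySem.List.pyRange 0 (N - 1) 1).foldl (fun q _ => pvStepA q) ["A", "B", "C"])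

-- ===== PORT B =====
-- "AB" + "ACB" * (N - 1) + "C"  (string * int = PySem.List.pyRepeat on the code points)
def solve_alt (N : Int) : String :=
  String.ofList ("AB".toList ++ PySem.List.pyRepeat "ACB".toList (N - 1) ++ "C".toList)

-- ===== PRECONDITION & SPEC =====
def Spec_solve (N : Int) (out : String) : Prop := out = solve_alt N
instance (N : Int) (out : String) : Decidable (Spec_solve N out) := by unfold Spec_solve; infer_instance

-- ===== CLAIM (what is proved, stated in full; the proofs are below) =====
def Claim_equal_solve : Prop := ∀ (N : Int), Dom_solve N → Spec_solve N (solve N)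

-- ===== LEMMAS AND PROOFS =====

-- the loop ignores the range element, so the fold is an iterate of pvStepA
theorem pvFoldl_const_iterate (l : List Int) (init : List String) :
    l.foldl (fun q _ => pvStepA q) init = pvStepA^[l.length] init := by
  induction l generalizing init with
  | nil => rfl
  | cons x t ih => simp [List.foldl_cons, ih, Function.iterate_succ_apply]

-- loop invariant: after k iterations the deque is ["A","B"] ++ k copies of ["A","C","B"] ++ ["C"]
theorem pvIterate_inv (k : Nat) :
    pvStepA^[k] ["A", "B", "C"] =
      ["A", "B"] ++ (List.replicate k ["A", "C", "B"]).flatten ++ ["C"] := by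
  induction k with
  | zero => rfl
  | succ k ih =>
      rw [Function.iterate_succ_apply', ih]
      have hpop : PySem.List.pop?
          ((["A", "B"] ++ (List.replicate k ["A", "C", "B"]).flatten) ++ ["C"]) =
          some ("C", ["A", "B"] ++ (List.replicate k ["A", "C", "B"]).flatten) :=
        PySem.List.pop?_last _ _
      simp only [List.append_assoc] at hpop ⊢
      simp only [pvStepA, hpop, List.replicate_succ']
      simp

-- "".join on char lists is flatten
theorem pvJoinNil (pss : List (List Char)) : PySem.Chars.join [] pss = pss.flatten := by
  induction pss with
  | nil => rfl
  | cons a t ih =>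
    cases t with
    | nil => simp [PySem.Chars.join, List.intercalate]
    | cons b t' =>
      simp only [PySem.Chars.join, List.intercalate] at ih ⊢
      simp [List.intersperse_cons₂, ih]

-- the joined characters of k copies of [['A'],['C'],['B']] are k copies of ['A','C','B']
theorem pvChars (k : Nat) :
    (List.replicate k ([['A'], ['C'], ['B']] : List (List Char))).flatten.flatten =
      (List.replicate k (['A', 'C', 'B'] : List Char)).flatten := by
  induction k with
  | zero => rfl
  | succ k ih => simp [List.replicate_succ, ih]

-- ===== VERDICT (by name: the statement is the Claim_ definition above) =====
theorem solve_spec : Claim_equal_solve := by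
  intro N _
  unfold Spec_solve solve solve_alt
  rw [pvFoldl_const_iterate, PySem.List.length_pyRange_one]
  have h : (N - 1 - 0).toNat = (N - 1).toNat := by omega
  rw [h, pvIterate_inv]
  apply String.toList_injective
  rw [PySem.Str.toList_join, show ("" : String).toList = ([] : List Char) from rfl,
    pvJoinNil]
  simp [List.map_append, List.flatten_append, pvChars, PySem.List.pyRepeat]
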